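-- pv_equiv track=rewrite | github.com/Unidata/awips2 | cave/build/static/common/cave/etc/gfe/userPython/textUtilities/regular/StringUtils.py | findRightMost
-- ===== SOURCE A (Python) =====
-- def findRightMost(text, breakStr=[" "], nonNumeric=1):
--     # Return the index of the right most break string characters
--     # and the break characters that were found.
--     # If nonNumeric, then make sure the index does not refer to
--     # a numeric character.
--     # If the break characters are a space, the index indicate
--     # the character prior to the space.
--     maxIndex = -1
--     maxChars = ''
--     for breakChars in breakStr:
--         index = text.rfind(breakChars)
--         done = False
--         while index > 0 and not done:
--             # Check for a numeric at end of line
--             if nonNumeric and breakChars == " " and text[index-1].isdigit():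
--                 # Try to find the next right most break char
--                 index = text.rfind(breakChars, 0, index-1)
--                 continue
--             done = True
--         if index > maxIndex:
--             maxIndex = index
--             maxChars = breakChars
--     if maxIndex == -1:
--         return maxIndex, maxChars
--     if maxChars == ' ':
--         index = maxIndex
--     else:
--         # We want to keep the breakChars, which are assumed not to end
--         # with a number
--         index = maxIndex + len(maxChars)
--     return index, maxChars
-- ===== SOURCE B (Python) =====
-- def findRightMost(text, breakStr=[" "], nonNumeric=1):
--     # Single reverse linear scan for the space case (instead of repeated
--     # rfind restarts): rightmost space not preceded by a digit.
--     maxIndex = -1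
--     maxChars = ''
--     for bc in breakStr:
--         if bc == " " and nonNumeric:
--             idx = -1
--             for i in range(len(text) - 1, -1, -1):
--                 if text[i] == " " and (i == 0 or not text[i - 1].isdigit()):
--                     idx = i
--                     break
--         else:
--             idx = text.rfind(bc)
--         if idx > maxIndex:
--             maxIndex = idx
--             maxChars = bc
--     if maxIndex == -1:
--         return maxIndex, maxChars
--     return (maxIndex if maxChars == " " else maxIndex + len(maxChars)), maxChars
-- ===== Notes on version B (the rewrite author's own statement) =====
-- stated objective: alternative
-- what changed: The repeated rfind-restart while-loop that skips digit-preceded spaces is replaced by a single reverse scan that directly picks the rightmost space not preceded by a digit.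
import Mathlib
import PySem

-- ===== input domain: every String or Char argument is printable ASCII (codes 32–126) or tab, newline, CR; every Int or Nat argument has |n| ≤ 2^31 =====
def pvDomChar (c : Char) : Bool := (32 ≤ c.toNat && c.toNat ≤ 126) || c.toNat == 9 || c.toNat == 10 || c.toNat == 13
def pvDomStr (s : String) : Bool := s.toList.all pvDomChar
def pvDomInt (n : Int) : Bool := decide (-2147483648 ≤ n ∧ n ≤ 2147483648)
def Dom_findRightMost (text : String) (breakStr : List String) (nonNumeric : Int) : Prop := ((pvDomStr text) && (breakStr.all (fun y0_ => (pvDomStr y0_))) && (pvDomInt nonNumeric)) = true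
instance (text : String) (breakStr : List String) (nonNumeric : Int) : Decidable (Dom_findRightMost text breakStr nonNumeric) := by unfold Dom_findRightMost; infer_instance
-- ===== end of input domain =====

-- B replaces A's restarted-rfind while loop (skipping digit-preceded spaces) by a
-- single reverse scan for the rightmost space not preceded by a digit (alternative
-- decomposition, same return value).

-- ===== PORT A =====

-- two bounds cited by whileA's decreasing_by (termination of A's while loop)
theorem rfind_go_le (s sub : List Char) : ∀ j : Nat, PySem.Chars.rfind.go s sub j ≤ (j : Int) := by
  intro j
  induction j with
  | zero => unfold PySem.Chars.rfind.go; split <;> simp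
  | succ k ih =>
    unfold PySem.Chars.rfind.go
    split
    · simp
    · exact le_trans ih (by push_cast; omega)

theorem rfindFrom_le_stop (cs sub : List Char) (m : Int) (hm : 0 ≤ m) :
    PySem.Chars.rfindFrom cs sub 0 (some m) ≤ m := by
  unfold PySem.Chars.rfindFrom PySem.Chars.rfind
  simp only
  have h0 : ¬ ((0:Int) < 0) := by omega
  simp only [if_neg h0]
  set e : Int := (if (cs.length : Int) < m then (cs.length : Int) else if m < 0 then if m + ↑cs.length < 0 then 0 else m + ↑cs.length else m) with he
  have hem : e ≤ m ∧ 0 ≤ e := by rw [he]; split_ifs <;> omega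
  split
  · omega
  · have hr := rfind_go_le (List.drop (Int.toNat 0) (List.take e.toNat cs)) sub
      (List.drop (Int.toNat 0) (List.take e.toNat cs)).length
    have hlen : ((List.drop (Int.toNat 0) (List.take e.toNat cs)).length : Int) ≤ e := by
      simp [List.length_take]; omega
    split
    · omega
    · have := le_trans hr hlen; omega

-- A's inner while loop: while index > 0 and not done, skip a space preceded by a
-- digit via text.rfind(breakChars, 0, index-1)
def whileA (nn : Bool) (breakChars : String) (text : String) (index : Int) : Int :=
  if h : 0 < index ∧ (nn && (breakChars == " ")
        && PySem.Chars.isdigit ((PySem.Str.pyGet? text (index - 1)).getD 'x')) = true then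
    whileA nn breakChars text (PySem.Str.rfindFrom text breakChars 0 (some (index - 1)))
  else index
termination_by index.toNat
decreasing_by
  have hle := rfindFrom_le_stop text.toList breakChars.toList (index - 1) (by omega)
  simp only [PySem.Str.rfindFrom_eq]
  omega

def findRightMost (text : String) (breakStr : List String) (nonNumeric : Int) : Int × String :=
  let r := breakStr.foldl (fun (acc : Int × String) breakChars =>
      let index0 := PySem.Str.rfind text breakChars
      let index := whileA (decide (nonNumeric ≠ 0)) breakChars text index0
      if acc.1 < index then (index, breakChars) else acc) (-1, "")
  if r.1 = -1 then r
  else if r.2 = " " then (r.1, r.2)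
  else (r.1 + (r.2.toList.length : Int), r.2)

-- ===== PORT B =====

-- B's reverse scan: rightmost i ≤ start with text[i] = ' ' and no digit before it
def revScan (cs : List Char) (i : Nat) : Int :=
  if (cs.getD i 'x') = ' ' ∧ (i = 0 ∨ ¬ PySem.Chars.isdigit (cs.getD (i - 1) 'x') = true) then (i : Int)
  else match i with
    | 0 => -1
    | j + 1 => revScan cs j

def findRightMost_alt (text : String) (breakStr : List String) (nonNumeric : Int) : Int × String :=
  let cs := text.toList
  let r := breakStr.foldl (fun (acc : Int × String) bc =>
      let idx := if bc = " " ∧ nonNumeric ≠ 0 then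
                   (if cs.length = 0 then -1 else revScan cs (cs.length - 1))
                 else PySem.Str.rfind text bc
      if acc.1 < idx then (idx, bc) else acc) (-1, "")
  if r.1 = -1 then r
  else if r.2 = " " then r
  else (r.1 + (r.2.toList.length : Int), r.2)

-- ===== PRECONDITION & SPEC =====
def Spec_findRightMost (text : String) (breakStr : List String) (nonNumeric : Int) (out : Int × String) : Prop := out = findRightMost_alt text breakStr nonNumeric
instance (text : String) (breakStr : List String) (nonNumeric : Int) (out : Int × String) : Decidable (Spec_findRightMost text breakStr nonNumeric out) := by unfold Spec_findRightMost; infer_instance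

-- ===== CLAIM (what is proved, stated in full; the proofs are below) =====
def Claim_equal_findRightMost : Prop := ∀ (text : String) (breakStr : List String) (nonNumeric : Int), Dom_findRightMost text breakStr nonNumeric → Spec_findRightMost text breakStr nonNumeric (findRightMost text breakStr nonNumeric)

-- ===== LEMMAS AND PROOFS =====

theorem prefix_single_true (c : Char) (cs : List Char) (j : Nat) (hj : j < cs.length) :
    ([c].isPrefixOf (cs.drop j)) = (c == cs[j]) := by
  have : cs.drop j = cs[j] :: cs.drop (j+1) := List.drop_eq_getElem_cons hj
  rw [this]
  simp [List.isPrefixOf]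

theorem prefix_single_false (c : Char) (cs : List Char) (j : Nat) (hj : cs.length ≤ j) :
    ([c].isPrefixOf (cs.drop j)) = false := by
  rw [List.drop_eq_nil_of_le hj]
  simp [List.isPrefixOf]

-- rfind searches only inside the truncated prefix, so below the cut it agrees
theorem go_take (cs : List Char) (e : Nat) (he : e ≤ cs.length) :
    ∀ j : Nat, j < e → PySem.Chars.rfind.go (cs.take e) [' '] j = PySem.Chars.rfind.go cs [' '] j := by
  intro j
  induction j with
  | zero =>
    intro hj
    unfold PySem.Chars.rfind.go
    have h1 := prefix_single_true ' ' (cs.take e) 0 (by simp; omega)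
    have h2 := prefix_single_true ' ' cs 0 (by omega)
    rw [List.drop_zero] at h1 h2
    rw [h1, h2, List.getElem_take]
  | succ k ih =>
    intro hj
    unfold PySem.Chars.rfind.go
    rw [prefix_single_true ' ' (cs.take e) (k+1) (by simp; omega),
        prefix_single_true ' ' cs (k+1) (by omega),
        List.getElem_take]
    split
    · rfl
    · exact ih (by omega)

-- text.rfind(" ", 0, m) is the downward search restarted at m-1
theorem rfindFrom_bridge (cs : List Char) (m : Nat) (hm : m ≤ cs.length) :
    PySem.Chars.rfindFrom cs [' '] 0 (some (m : Int))
      = if m = 0 then -1 else PySem.Chars.rfind.go cs [' '] (m - 1) := by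
  unfold PySem.Chars.rfindFrom PySem.Chars.rfind
  have h0 : ¬ ((0:Int) < 0) := by omega
  simp only [if_neg h0, Int.toNat_zero, List.drop_zero]
  have he : (if (cs.length : Int) < (m:Int) then (cs.length : Int) else if (m:Int) < 0 then if (m:Int) + ↑cs.length < 0 then 0 else (m:Int) + ↑cs.length else (m:Int)) = (m : Int) := by
    split_ifs <;> omega
  rw [he]
  have hst : ¬ ((m:Int) < 0) := by omega
  simp only [if_neg hst, Int.toNat_natCast]
  have hlen : (cs.take m).length = m := by simp; omega
  rw [hlen]
  cases m with
  | zero =>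
    unfold PySem.Chars.rfind.go
    simp
  | succ k =>
    conv_lhs => unfold PySem.Chars.rfind.go
    rw [prefix_single_false ' ' (cs.take (k+1)) (k+1) (by simp)]
    simp only [Bool.false_eq_true, if_false]
    rw [go_take cs (k+1) hm k (by omega)]
    rw [if_neg (by omega : ¬ (k+1 = 0))]
    simp only [Nat.add_sub_cancel]
    split <;> rename_i hr
    · rw [hr]
    · simp

theorem whileA_neg_one (nn : Bool) (bc text : String) : whileA nn bc text (-1) = -1 := by
  rw [whileA]; simp

theorem revScan_hit (cs : List Char) (i : Nat)
    (h : (cs.getD i 'x') = ' ' ∧ (i = 0 ∨ ¬ PySem.Chars.isdigit (cs.getD (i - 1) 'x') = true)) :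
    revScan cs i = (i : Int) := by
  rw [revScan.eq_def, if_pos h]

theorem revScan_miss_zero (cs : List Char)
    (h : ¬ ((cs.getD 0 'x') = ' ' ∧ (0 = 0 ∨ ¬ PySem.Chars.isdigit (cs.getD (0 - 1) 'x') = true))) :
    revScan cs 0 = -1 := by
  rw [revScan.eq_def, if_neg h]

theorem revScan_miss_succ (cs : List Char) (j : Nat)
    (h : ¬ ((cs.getD (j+1) 'x') = ' ' ∧ (j+1 = 0 ∨ ¬ PySem.Chars.isdigit (cs.getD (j+1 - 1) 'x') = true))) :
    revScan cs (j+1) = revScan cs j := by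
  rw [revScan.eq_def, if_neg h]

theorem digit_ne_space (c : Char) (h : PySem.Chars.isdigit c = true) : ¬ (c = ' ') := by
  intro hc; rw [hc] at h; exact absurd h (by decide)

-- the crux: A's restart loop started at the rightmost space ≤ j equals B's scan from j
theorem main_loop (text : String) : ∀ j, j < text.toList.length →
    whileA true " " text (PySem.Chars.rfind.go text.toList [' '] j) = revScan text.toList j := by
  intro j
  induction j using Nat.strong_induction_on with
  | _ j ih =>
  intro hj
  cases j with
  | zero =>
    unfold PySem.Chars.rfind.go
    have h2 := prefix_single_true ' ' text.toList 0 hj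
    rw [List.drop_zero] at h2
    rw [h2]
    by_cases hsp : text.toList[0] = ' '
    · rw [if_pos (by simp [hsp])]
      rw [whileA]
      rw [revScan_hit text.toList 0 ⟨by rw [List.getD_eq_getElem _ _ hj, hsp], Or.inl rfl⟩]
      simp
    · rw [if_neg (by simp; intro h; exact absurd h.symm hsp)]
      rw [whileA_neg_one,
        revScan_miss_zero text.toList (by rw [List.getD_eq_getElem _ _ hj]; intro h; exact hsp h.1)]
  | succ k =>
    conv_lhs => unfold PySem.Chars.rfind.go
    rw [prefix_single_true ' ' text.toList (k+1) hj]
    have hk : k < text.toList.length := by omega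
    have hgd1 : text.toList.getD (k+1) 'x' = text.toList[k+1] := List.getD_eq_getElem _ _ hj
    have hgdk : text.toList.getD k 'x' = text.toList[k] := List.getD_eq_getElem _ _ hk
    by_cases hsp : text.toList[k+1] = ' '
    · rw [if_pos (by simp [hsp])]
      rw [whileA]
      have harg : ((k+1 : Nat) : Int) - 1 = ((k : Nat) : Int) := by push_cast; omega
      have hget : (PySem.Str.pyGet? text (((k+1 : Nat) : Int) - 1)).getD 'x' = text.toList[k] := by
        rw [harg]
        simp [List.getElem?_eq_getElem hk]
      by_cases hd : PySem.Chars.isdigit (text.toList[k]) = true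
      · rw [dif_pos (by refine ⟨by push_cast; omega, ?_⟩; simp only [hget]; simp [hd])]
        rw [PySem.Str.rfindFrom_eq]
        have hbc : (" " : String).toList = [' '] := rfl
        rw [hbc, harg, rfindFrom_bridge text.toList k (by omega)]
        rw [revScan_miss_succ text.toList k (by
          push Not
          intro _
          constructor
          · omega
          · simp only [Nat.add_sub_cancel, hgdk]; simp [hd])]
        cases k with
        | zero =>
          rw [if_pos rfl, whileA_neg_one,
            revScan_miss_zero text.toList (by rw [hgdk]; intro h; exact digit_ne_space _ hd h.1)]
        | succ m =>
          rw [if_neg (by omega)]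
          simp only [Nat.add_sub_cancel]
          rw [revScan_miss_succ text.toList m (by
            rw [show m + 1 - 1 = m from rfl]
            intro hcon
            exact digit_ne_space _ hd (by rw [← hgdk]; exact hcon.1))]
          exact ih m (by omega) (by omega)
      · rw [dif_neg (by intro hcon; exact hd (by rw [← hget]; simpa using hcon.2))]
        rw [revScan_hit text.toList (k+1) ⟨by rw [hgd1]; exact hsp,
          Or.inr (by simp only [Nat.add_sub_cancel, hgdk]; exact hd)⟩]
    · rw [if_neg (by simp; intro h; exact absurd h.symm hsp)]
      rw [revScan_miss_succ text.toList k (by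
        intro hcon
        exact hsp (by rw [← hgd1]; exact hcon.1))]
      exact ih k (by omega) hk

theorem whileA_id (nn : Bool) (bc text : String) (i : Int) (h : (nn && (bc == " ")) = false) :
    whileA nn bc text i = i := by
  rw [whileA, dif_neg (by simp [h])]

-- per-break-string candidate: A's rfind + skip loop = B's candidate
theorem cand (text bc : String) (nn : Int) :
    whileA (decide (nn ≠ 0)) bc text (PySem.Str.rfind text bc)
      = if bc = " " ∧ nn ≠ 0 then
          (if text.toList.length = 0 then -1 else revScan text.toList (text.toList.length - 1))
        else PySem.Str.rfind text bc := by
  by_cases hc : bc = " " ∧ nn ≠ 0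
  · rw [if_pos hc, hc.1]
    have hnn : decide (nn ≠ 0) = true := by simp [hc.2]
    rw [hnn, PySem.Str.rfind_eq]
    rw [show (" " : String).toList = [' '] from rfl]
    unfold PySem.Chars.rfind
    cases hlen : text.toList.length with
    | zero =>
      rw [if_pos rfl]
      have hnil : text.toList = [] := List.eq_nil_of_length_eq_zero hlen
      rw [hnil]
      unfold PySem.Chars.rfind.go
      rw [show ([' '].isPrefixOf ([] : List Char)) = false from rfl]
      simp [whileA_neg_one]
    | succ k =>
      rw [if_neg (by omega)]
      conv_lhs => unfold PySem.Chars.rfind.go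
      rw [prefix_single_false ' ' text.toList (k+1) (by omega)]
      simp only [Bool.false_eq_true, if_false, Nat.add_sub_cancel]
      exact main_loop text k (by omega)
  · rw [if_neg hc]
    apply whileA_id
    by_cases hbc : bc = " "
    · have : nn = 0 := by by_contra h; exact hc ⟨hbc, h⟩
      simp [this]
    · simp [hbc]

-- ===== VERDICT (by name: the statement is the Claim_ definition above) =====
theorem findRightMost_spec : Claim_equal_findRightMost := by
  intro text breakStr nonNumeric _
  unfold Spec_findRightMost findRightMost findRightMost_alt
  simp only [cand, Prod.mk.eta]
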